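-- pv_equiv track=rewrite | github.com/MLPlatformWebsite/website | tools/check_links_3.py | failures_to_dict
-- ===== SOURCE A (Python) =====
-- def drop_dot(string_to_check):
--     """ If the string starts with a full-stop, drop it. """
--     if string_to_check != "" and string_to_check[0] == '.':
--         return string_to_check[1:]
--     return string_to_check
--
-- def failures_to_dict(list_of_failures):
--     """ Convert the list into a dictionary. """
--     failure_dict = {}
--     for failure in list_of_failures:
--         file = drop_dot(failure[0])
--         url = drop_dot(failure[1])
--         if file in failure_dict:
--             failure_dict[file].append(url)
--         else:
--             failure_dict[file] = [url]
--     return failure_dict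
-- ===== SOURCE B (Python) =====
-- def drop_dot(string_to_check):
--     """ If the string starts with a full-stop, drop it. """
--     if string_to_check != "" and string_to_check[0] == '.':
--         return string_to_check[1:]
--     return string_to_check
--
-- def failures_to_dict(list_of_failures):
--     """ Convert the list into a dictionary. """
--     pairs = [(drop_dot(file), drop_dot(url)) for file, url in list_of_failures]
--     keys = dict.fromkeys(file for file, _ in pairs)
--     return {file: [url for f, url in pairs if f == file] for file in keys}
-- ===== Notes on version B (the rewrite author's own statement) =====
-- stated objective: alternative
-- what changed: B replaces A's single-pass dict building with conditional append/insert by a two-phase grouping: normalise all pairs with drop_dot first, dedup the file keys in first-appearance order, then build each group's url list with a filter comprehension.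
import Mathlib
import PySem

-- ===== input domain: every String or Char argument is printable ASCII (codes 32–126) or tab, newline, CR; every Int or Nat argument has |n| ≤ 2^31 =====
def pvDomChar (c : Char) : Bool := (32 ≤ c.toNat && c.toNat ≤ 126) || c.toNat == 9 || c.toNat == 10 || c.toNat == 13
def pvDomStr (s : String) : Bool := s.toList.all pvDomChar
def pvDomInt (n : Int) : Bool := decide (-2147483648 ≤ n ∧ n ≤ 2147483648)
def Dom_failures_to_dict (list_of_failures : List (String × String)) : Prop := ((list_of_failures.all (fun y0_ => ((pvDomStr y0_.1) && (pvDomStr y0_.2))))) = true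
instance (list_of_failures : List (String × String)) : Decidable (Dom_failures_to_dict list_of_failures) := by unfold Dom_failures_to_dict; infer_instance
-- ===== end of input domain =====

-- B groups by a different decomposition: map drop_dot over all pairs, dedup the file keys
-- in first-appearance order, then collect each group's urls with a filter (alternative algorithm).


-- ===== PORT A =====
-- drop_dot: s[0] == '.' compares the length-1 string s[0] with '.'; on a nonempty string this
-- is exactly the first-character comparison ported here via PySem.Str.pyGet?.
def drop_dot (string_to_check : String) : String :=
  if string_to_check ≠ "" ∧ PySem.Str.pyGet? string_to_check 0 = some '.' then
    PySem.Str.slice string_to_check (some 1) none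
  else
    string_to_check

def failures_to_dict (list_of_failures : List (String × String)) : List (String × List String) :=
  (list_of_failures.foldl
    (fun failure_dict failure =>
      let file := drop_dot failure.1
      let url := drop_dot failure.2
      if failure_dict.contains file then
        failure_dict.modify file [] (fun v => v ++ [url])
      else
        failure_dict.insert file [url])
    (PySem.Dict.empty : PySem.Dict String (List String))).items

-- ===== PORT B =====
def failures_to_dict_alt (list_of_failures : List (String × String)) : List (String × List String) :=
  let pairs := list_of_failures.map (fun x => (drop_dot x.1, drop_dot x.2))
  let keys := PySem.List.dedup (pairs.map Prod.fst)
  keys.map (fun file => (file, (pairs.filter (fun p => p.1 == file)).map Prod.snd))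

-- ===== PRECONDITION & SPEC =====
def Spec_failures_to_dict (list_of_failures : List (String × String)) (out : List (String × List String)) : Prop := out = failures_to_dict_alt list_of_failures
instance (list_of_failures : List (String × String)) (out : List (String × List String)) : Decidable (Spec_failures_to_dict list_of_failures out) := by unfold Spec_failures_to_dict; infer_instance

-- ===== CLAIM (what is proved, stated in full; the proofs are below) =====
def Claim_equal_failures_to_dict : Prop := ∀ (list_of_failures : List (String × String)), Dom_failures_to_dict list_of_failures → Spec_failures_to_dict list_of_failures (failures_to_dict list_of_failures)

-- ===== LEMMAS AND PROOFS =====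

-- the urls grouped under key k by B
def pvUrls (ps : List (String × String)) (k : String) : List String :=
  (ps.filter (fun p => p.1 == k)).map Prod.snd

-- B's grouping, over already-normalised pairs
def pvGroup (ps : List (String × String)) : List (String × List String) :=
  (PySem.List.dedup (ps.map Prod.fst)).map (fun k => (k, pvUrls ps k))

-- A's loop step, over already-normalised pairs
def pvStep (d : PySem.Dict String (List String)) (p : String × String) : PySem.Dict String (List String) :=
  if d.contains p.1 then d.modify p.1 [] (fun v => v ++ [p.2]) else d.insert p.1 [p.2]

lemma pvUrls_append (ps : List (String × String)) (p : String × String) (k : String) :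
    pvUrls (ps ++ [p]) k = pvUrls ps k ++ (if p.1 = k then [p.2] else []) := by
  simp [pvUrls, List.filter_append]
  split_ifs with h <;> simp [h]

lemma pvUrls_of_not_mem (ps : List (String × String)) (k : String)
    (h : k ∉ ps.map Prod.fst) : pvUrls ps k = [] := by
  simp [pvUrls, List.filter_eq_nil_iff]
  intro a b hab
  exact fun hk => h (by simpa [hk] using List.mem_map_of_mem (f := Prod.fst) hab)

lemma pvGroup_append (ps : List (String × String)) (p : String × String) :
    pvGroup (ps ++ [p]) =
      (PySem.Set.add (PySem.List.dedup (ps.map Prod.fst)) p.1).map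
        (fun k => (k, pvUrls ps k ++ (if p.1 = k then [p.2] else []))) := by
  unfold pvGroup
  have hk : PySem.List.dedup ((ps ++ [p]).map Prod.fst)
      = PySem.Set.add (PySem.List.dedup (ps.map Prod.fst)) p.1 := by
    simp [PySem.List.dedup, PySem.Set.ofList_eq_foldl, List.foldl_append]
  rw [hk]
  exact List.map_congr_left (fun k _ => by rw [pvUrls_append])

lemma pvGroup_invariant (ps : List (String × String)) :
    (ps.foldl pvStep PySem.Dict.empty).items = pvGroup ps := by
  induction ps using List.reverseRecOn with
  | nil => simp [pvGroup, PySem.Dict.empty, PySem.List.dedup, PySem.Set.ofList]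
  | append_singleton ps p ih =>
    rw [List.foldl_append, List.foldl_cons, List.foldl_nil, pvGroup_append]
    set d := ps.foldl pvStep (PySem.Dict.empty : PySem.Dict String (List String)) with hd
    set K := PySem.List.dedup (ps.map Prod.fst) with hK
    have hnodup : K.Nodup := PySem.List.nodup_dedup _
    have hmemK : p.1 ∈ K ↔ p.1 ∈ ps.map Prod.fst := PySem.List.mem_dedup _ _
    have hitems : d.items = K.map (fun k => (k, pvUrls ps k)) := by
      rw [ih]; unfold pvGroup; rw [← hK]
    by_cases hm : p.1 ∈ ps.map Prod.fst
    · -- existing key: A modifies that entry in place, B appends p.2 to that key's group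
      have hKm : p.1 ∈ K := hmemK.mpr hm
      have hc : d.contains p.1 = true := by
        rw [show d.contains p.1 = d.items.any (fun q => q.1 == p.1) from rfl, hitems]
        simp only [List.any_map, List.any_eq_true, Function.comp]
        exact ⟨p.1, hKm, by simp⟩
      have hSc : PySem.Set.contains K p.1 = true := (PySem.Set.contains_iff _ _).mpr hKm
      have hgetD : d.getD p.1 [] = pvUrls ps p.1 := by
        apply PySem.Dict.getD_of_mem_items
        · rw [hitems]; exact List.mem_map_of_mem hKm
        · have hkeys : d.keys = K := by
            simp only [PySem.Dict.keys]; rw [hitems, List.map_map]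
            exact (List.map_congr_left fun k _ => rfl).trans (List.map_id K)
          rw [hkeys]; exact hnodup
      rw [show PySem.Set.add K p.1 = K from by unfold PySem.Set.add; rw [if_pos hSc]]
      rw [show pvStep d p = d.insert p.1 (d.getD p.1 [] ++ [p.2]) from by
        unfold pvStep; rw [if_pos hc]; rfl]
      rw [PySem.Dict.insert, if_pos hc, hgetD, hitems, List.map_map]
      apply List.map_congr_left
      intro k _
      by_cases hkp : k = p.1
      · simp [Function.comp, hkp]
      · simp [Function.comp, hkp, Ne.symm hkp]
    · -- fresh key: A appends a new entry, B appends a new singleton group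
      have hKm : p.1 ∉ K := fun h => hm (hmemK.mp h)
      have hc : d.contains p.1 = false := by
        rw [show d.contains p.1 = d.items.any (fun q => q.1 == p.1) from rfl, hitems]
        simp only [List.any_map, List.any_eq_false, Function.comp]
        intro k hk h
        exact hKm ((eq_of_beq h) ▸ hk)
      have hSc : PySem.Set.contains K p.1 = false := by
        cases hb : PySem.Set.contains K p.1 with
        | false => rfl
        | true => exact absurd ((PySem.Set.contains_iff _ _).mp hb) hKm
      rw [show PySem.Set.add K p.1 = K ++ [p.1] from by unfold PySem.Set.add; rw [if_neg (by rw [hSc]; exact Bool.false_ne_true)]]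
      rw [show pvStep d p = d.insert p.1 [p.2] from by unfold pvStep; rw [if_neg (by rw [hc]; exact Bool.false_ne_true)]]
      rw [PySem.Dict.insert, if_neg (by rw [hc]; exact Bool.false_ne_true)]
      show d.items ++ [(p.1, [p.2])] = _
      rw [List.map_append, hitems]
      congr 1
      · apply List.map_congr_left
        intro k hk
        have hne : p.1 ≠ k := fun h => hm (by
          have : k ∈ ps.map Prod.fst := (PySem.List.mem_dedup _ _).mp hk
          rwa [h])
        simp [hne]
      · simp [pvUrls_of_not_mem ps p.1 hm]

lemma failures_to_dict_eq_group (l : List (String × String)) :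
    failures_to_dict l = pvGroup (l.map (fun x => (drop_dot x.1, drop_dot x.2))) := by
  unfold failures_to_dict
  rw [show (fun (failure_dict : PySem.Dict String (List String)) (failure : String × String) =>
        let file := drop_dot failure.1
        let url := drop_dot failure.2
        if failure_dict.contains file then failure_dict.modify file [] (fun v => v ++ [url])
        else failure_dict.insert file [url])
      = (fun d failure => pvStep d (drop_dot failure.1, drop_dot failure.2)) from rfl]
  have h : List.foldl (fun d failure => pvStep d (drop_dot failure.1, drop_dot failure.2))
      (PySem.Dict.empty : PySem.Dict String (List String)) l
      = List.foldl pvStep PySem.Dict.empty (l.map (fun x => (drop_dot x.1, drop_dot x.2))) :=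
    List.foldl_map.symm
  rw [h]
  exact pvGroup_invariant _

-- ===== VERDICT (by name: the statement is the Claim_ definition above) =====
theorem failures_to_dict_spec : Claim_equal_failures_to_dict := by
  intro l _
  unfold Spec_failures_to_dict failures_to_dict_alt
  rw [failures_to_dict_eq_group]
  rfl
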